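-- pv_equiv track=rewrite | github.com/ejfancher/crypto | classic_ciphers/transposition_cipher.py | text_to_box1
-- ===== SOURCE A (Python) =====
-- def text_to_box1(text, dim):
--     box1 = [[0 for i in range(dim)] for k in range(dim)]
--     k = 0
--     for i in range(dim):
--         for j in range(dim):
--             if k < len(text):
--                 box1[i][j] = text[k]
--             else:
--                 box1[i][j] = 'z'
--             j += 1
--             k += 1
--         i += 1
--     return box1
-- ===== SOURCE B (Python) =====
-- def text_to_box1(text, dim):
--     if dim <= 0:
--         return []
--     n = dim * dim
--     padded = (list(text) + ['z'] * n)[:n]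
--     return [padded[r * dim:(r + 1) * dim] for r in range(dim)]
-- ===== Notes on version B (the rewrite author's own statement) =====
-- stated objective: simpler
-- what changed: Replaces the nested per-cell fill loop with manual k counter and conditional by building one flat padded sequence (text + 'z' padding, truncated to dim*dim) and reshaping it into dim rows by slicing.
import Mathlib
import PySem

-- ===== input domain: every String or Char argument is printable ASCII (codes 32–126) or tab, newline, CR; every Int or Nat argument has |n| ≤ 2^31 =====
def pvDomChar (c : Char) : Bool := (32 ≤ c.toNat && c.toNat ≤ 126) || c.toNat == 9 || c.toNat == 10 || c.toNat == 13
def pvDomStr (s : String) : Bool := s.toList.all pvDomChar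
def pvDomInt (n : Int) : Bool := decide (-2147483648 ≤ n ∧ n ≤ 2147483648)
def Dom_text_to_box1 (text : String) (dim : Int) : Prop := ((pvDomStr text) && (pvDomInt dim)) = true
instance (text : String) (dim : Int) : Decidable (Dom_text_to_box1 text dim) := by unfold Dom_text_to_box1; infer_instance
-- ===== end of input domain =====

-- B builds one flat padded sequence and reshapes it into dim rows by slicing, replacing A's
-- nested per-cell fill loop with its manual k counter and conditional (objective: simpler).

-- ===== PORT A =====
def text_to_box1 (text : String) (dim : Int) : List (List String) :=
  let chars := text.toList
  let box1 : List (List String) :=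
    (PySem.List.pyRange 0 dim 1).map (fun _k =>
      (PySem.List.pyRange 0 dim 1).map (fun _i => "0"))
  let st := (PySem.List.pyRange 0 dim 1).foldl (fun st i =>
      (PySem.List.pyRange 0 dim 1).foldl (fun (st : List (List String) × Int) j =>
        let v : String := if st.2 < PySem.List.len chars
          then String.ofList [PySem.List.pyGetD chars st.2 ' ']   -- text[k], guarded in range
          else "z"
        (PySem.List.pySetD st.1 i (PySem.List.pySetD (PySem.List.pyGetD st.1 i []) j v),
         st.2 + 1)) st)
    (box1, (0 : Int))
  st.1

-- ===== PORT B =====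
def text_to_box1_alt (text : String) (dim : Int) : List (List String) :=
  if dim ≤ 0 then [] else
  let n := dim * dim
  let padded := PySem.List.slice
    (text.toList.map (fun c => String.ofList [c]) ++ List.replicate n.toNat "z") (some 0) (some n)
  (PySem.List.pyRange 0 dim 1).map (fun r =>
    PySem.List.slice padded (some (r * dim)) (some ((r + 1) * dim)))

-- ===== PRECONDITION & SPEC =====
def Spec_text_to_box1 (text : String) (dim : Int) (out : List (List String)) : Prop := out = text_to_box1_alt text dim
instance (text : String) (dim : Int) (out : List (List String)) : Decidable (Spec_text_to_box1 text dim out) := by unfold Spec_text_to_box1; infer_instance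

-- ===== CLAIM (what is proved, stated in full; the proofs are below) =====
def Claim_equal_text_to_box1 : Prop := ∀ (text : String) (dim : Int), Dom_text_to_box1 text dim → Spec_text_to_box1 text dim (text_to_box1 text dim)

-- ===== LEMMAS AND PROOFS =====

def pvCell (chars : List Char) (k : Nat) : String :=
  if (k : Int) < chars.length then String.ofList [chars.getD k ' '] else "z"
def pvRow (chars : List Char) (d r : Nat) : List String :=
  (List.range d).map (fun j => pvCell chars (r * d + j))
def pvGrid (chars : List Char) (d : Nat) : List (List String) :=
  (List.range d).map (pvRow chars d)

def pvFill (chars : List Char) (t : Nat) (row : List String) (m : Nat) : List String :=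
  (List.range m).foldl (fun r j => r.set j (pvCell chars (t + j))) row

lemma pvFill_succ (chars : List Char) (t : Nat) (row : List String) (m : Nat) :
    pvFill chars t row (m + 1) = (pvFill chars t row m).set m (pvCell chars (t + m)) := by
  simp [pvFill, List.range_succ]

lemma length_pvFill (chars : List Char) (t : Nat) (row : List String) (m : Nat) :
    (pvFill chars t row m).length = row.length := by
  induction m with
  | zero => rfl
  | succ m ih => rw [pvFill_succ, List.length_set, ih]

lemma getElem_pvFill (chars : List Char) (t : Nat) (row : List String) (m p : Nat)
    (hp : p < row.length) :
    (pvFill chars t row m)[p]'(by rw [length_pvFill]; exact hp)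
      = if p < m then pvCell chars (t + p) else row[p] := by
  induction m with
  | zero => simp [pvFill]
  | succ m ih =>
      simp only [pvFill_succ, List.getElem_set]
      by_cases hpm : m = p
      · subst hpm; simp
      · rw [if_neg hpm, ih]
        by_cases h1 : p < m
        · rw [if_pos h1, if_pos (by omega)]
        · rw [if_neg h1, if_neg (by omega)]

lemma pvFill_full (chars : List Char) (t : Nat) (row : List String) (d : Nat)
    (hrow : row.length = d) :
    pvFill chars t row d = (List.range d).map (fun j => pvCell chars (t + j)) := by
  apply List.ext_getElem
  · rw [length_pvFill, hrow, List.length_map, List.length_range]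
  · intro p h1 h2
    have hp : p < row.length := by rw [length_pvFill] at h1; exact h1
    rw [getElem_pvFill chars t row d p hp, List.getElem_map, List.getElem_range,
      if_pos (by omega)]

-- the inner loop body of port A
def pvBodyIn (chars : List Char) (i : Int) (st : List (List String) × Int) (j : Int) :
    List (List String) × Int :=
  let v : String := if st.2 < PySem.List.len chars
    then String.ofList [PySem.List.pyGetD chars st.2 ' ']
    else "z"
  (PySem.List.pySetD st.1 i (PySem.List.pySetD (PySem.List.pyGetD st.1 i []) j v), st.2 + 1)

-- the whole inner loop = outer loop body of port A
def pvBodyOut (chars : List Char) (dim : Int) (st : List (List String) × Int) (i : Int) :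
    List (List String) × Int :=
  (PySem.List.pyRange 0 dim 1).foldl (pvBodyIn chars i) st

lemma text_to_box1_eq_fold (text : String) (dim : Int) :
    text_to_box1 text dim
      = (((PySem.List.pyRange 0 dim 1).foldl (pvBodyOut text.toList dim)
          ((PySem.List.pyRange 0 dim 1).map (fun _ =>
            (PySem.List.pyRange 0 dim 1).map (fun _ => "0")), 0))).1 := rfl

lemma getD_set_self (b : List (List String)) (i : Nat) (R : List String)
    (hi : i < b.length) : (b.set i R).getD i [] = R := by
  rw [List.getD_eq_getElem _ _ (by simpa using hi)]
  exact List.getElem_set_self (by simpa using hi)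

lemma innerA_aux (chars : List Char) (i t : Nat) (b : List (List String))
    (hi : i < b.length) (d : Nat) :
    (List.range d).foldl (fun st (j : Nat) => pvBodyIn chars (i : Int) st (j : Int)) (b, (t : Int))
      = (b.set i (pvFill chars t (b.getD i []) d), ((t + d : Nat) : Int)) := by
  induction d with
  | zero =>
      simp only [List.range_zero, List.foldl_nil, pvFill, Nat.add_zero]
      rw [List.getD_eq_getElem _ _ hi, List.set_getElem_self]
  | succ d ih =>
      rw [List.range_succ, List.foldl_append, ih]
      simp only [List.foldl_cons, List.foldl_nil, pvBodyIn, PySem.List.pySetD_natCast,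
        PySem.List.pyGetD_natCast, PySem.List.len_eq]
      rw [Prod.mk.injEq]
      refine ⟨?_, ?_⟩
      · rw [getD_set_self b i _ hi, List.set_set, pvFill_succ]
        congr 1
      · push_cast; ring

lemma innerA (chars : List Char) (d : Nat) (i t : Nat) (b : List (List String))
    (hi : i < b.length) :
    pvBodyOut chars (d : Int) (b, (t : Int)) (i : Int)
      = (b.set i (pvFill chars t (b.getD i []) d), ((t + d : Nat) : Int)) := by
  unfold pvBodyOut
  rw [PySem.List.pyRange_zero_natCast, List.foldl_map]
  exact innerA_aux chars i t b hi d

lemma outer_aux (chars : List Char) (d : Nat) :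
    ∀ m, m ≤ d →
    (List.range m).foldl (fun st (i : Nat) => pvBodyOut chars (d : Int) st (i : Int))
        (List.replicate d (List.replicate d "0"), (0 : Int))
      = ((List.range m).map (pvRow chars d) ++ List.replicate (d - m) (List.replicate d "0"),
         ((m * d : Nat) : Int)) := by
  intro m
  induction m with
  | zero => simp
  | succ m ih =>
      intro hm
      rw [List.range_succ, List.foldl_append, ih (by omega)]
      simp only [List.foldl_cons, List.foldl_nil]
      have hlen : ((List.range m).map (pvRow chars d)
          ++ List.replicate (d - m) (List.replicate d "0")).length = d := by
        simp; omega
      have hm' : m < ((List.range m).map (pvRow chars d)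
          ++ List.replicate (d - m) (List.replicate d "0")).length := by omega
      rw [innerA chars d m (m * d) _ hm']
      have hget : (((List.range m).map (pvRow chars d)
          ++ List.replicate (d - m) (List.replicate d "0")).getD m []) = List.replicate d "0" := by
        rw [List.getD_eq_getElem _ _ hm', List.getElem_append_right (by simp)]
        simp
      rw [hget, pvFill_full _ _ _ _ (by simp)]
      rw [Prod.mk.injEq]
      refine ⟨?_, by push_cast; ring⟩
      have hrep : List.replicate (d - m) (List.replicate d "0")
          = List.replicate d "0" :: List.replicate (d - (m + 1)) (List.replicate d "0") := by
        rw [← List.replicate_succ]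
        congr 1
        omega
      rw [hrep, List.map_append]
      have hsetlen : m = ((List.range m).map (pvRow chars d)).length := by simp
      conv_lhs => rw [hsetlen]
      simp [pvRow]
theorem text_to_box1_eq_grid (text : String) (dim : Int) :
    text_to_box1 text dim = pvGrid text.toList dim.toNat := by
  rcases le_or_gt dim 0 with h | h
  · rw [text_to_box1_eq_fold, PySem.List.pyRange_one_eq_nil (by omega)]
    simp [pvGrid, Int.toNat_of_nonpos h]
  · have hd : dim = (dim.toNat : Int) := (Int.toNat_of_nonneg (by omega)).symm
    set d := dim.toNat with hdd
    rw [text_to_box1_eq_fold, hd, PySem.List.pyRange_zero_natCast, List.foldl_map]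
    have hbox : ((List.range d).map (fun (k:Nat) => (k:Int))).map (fun _ =>
        ((List.range d).map (fun (k:Nat) => (k:Int))).map (fun _ => "0"))
        = List.replicate d (List.replicate d "0") := by
      simp [Function.comp_def, List.map_const']
    rw [hbox, outer_aux text.toList d d le_rfl]
    simp [pvGrid]
lemma padded_eq (chars : List Char) (N : Nat) :
    (chars.map (fun c => String.ofList [c]) ++ List.replicate N "z").take N
      = (List.range N).map (pvCell chars) := by
  apply List.ext_getElem
  · simp
  · intro k h1 h2
    simp only [List.getElem_take, List.getElem_map, List.getElem_range]
    by_cases hk : k < chars.length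
    · rw [List.getElem_append_left (by simpa using hk)]
      simp [pvCell, hk]
    · rw [List.getElem_append_right (by simpa using hk)]
      simp only [List.getElem_replicate, pvCell]
      rw [if_neg (by exact_mod_cast hk)]

theorem text_to_box1_alt_eq_grid (text : String) (dim : Int) :
    text_to_box1_alt text dim = pvGrid text.toList dim.toNat := by
  rcases le_or_gt dim 0 with h | h
  · simp only [text_to_box1_alt, if_pos h]
    simp [pvGrid, Int.toNat_of_nonpos h]
  · have hd : dim = (dim.toNat : Int) := (Int.toNat_of_nonneg (by omega)).symm
    set d := dim.toNat with hdd
    simp only [text_to_box1_alt, if_neg (by omega : ¬ dim ≤ 0)]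
    rw [hd]
    have hcast : ((d : Int) * (d : Int)) = ((d * d : Nat) : Int) := by push_cast; ring
    have hnn : ((d : Int) * (d : Int)).toNat = d * d := by rw [hcast]; exact Int.toNat_natCast _
    rw [hnn, hcast, PySem.List.slice_zero_start, PySem.List.slice_to_natCast,
      padded_eq text.toList (d * d), PySem.List.pyRange_zero_natCast, List.map_map]
    unfold pvGrid
    apply List.map_congr_left
    intro r hr
    have hrd : r < d := List.mem_range.mp hr
    have c1 : ((r : Int) * (d : Int)) = ((r * d : Nat) : Int) := by push_cast; ring
    have c2 : (((r : Int) + 1) * (d : Int)) = (((r + 1) * d : Nat) : Int) := by push_cast; ring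
    simp only [Function.comp_apply]
    rw [c1, c2, PySem.List.slice_natCast]
    have hle : (r + 1) * d ≤ d * d := Nat.mul_le_mul_right _ (by omega)
    have hsm : (r + 1) * d = r * d + d := by rw [Nat.succ_mul]
    have hsub : (r + 1) * d - r * d = d := by omega
    rw [hsub, ← List.map_drop, List.range_eq_range', List.drop_range']
    rw [← List.map_take, List.take_range'_of_length_ge (by omega)]
    rw [List.range'_eq_map_range, List.map_map]
    simp [pvRow]

-- ===== VERDICT (by name: the statement is the Claim_ definition above) =====
theorem text_to_box1_spec : Claim_equal_text_to_box1 := by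
  intro text dim _
  unfold Spec_text_to_box1
  rw [text_to_box1_eq_grid, text_to_box1_alt_eq_grid]
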